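-- pv_equiv track=rewrite | github.com/kvkarandashev/competent_formatting | competent_formatting/SMILES.py | SMILES_wlinebreaks
-- ===== SOURCE A (Python) =====
-- manysymbol_elements = ["He", "Li", "Be", "Na", "Mg", "Si", "Cl", "Br"]
--
-- def bad_SMILES_break(SMILES, possible_break):
--     return SMILES[possible_break - 1 : possible_break + 1].capitalize() in manysymbol_elements
--
-- def SMILES_wlinebreaks(SMILES, linebreaks_freq):
--     """
--     For fitting long SMILES into narrow tables. Let me know if there is a better standard; I decided to settle to just not breaking element names.
--     """
--     linebreaks = [0]
--
--     prev_good_linebreak = 0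
--
--     for possible_break in range(1, len(SMILES)):
--         if bad_SMILES_break(SMILES, possible_break):
--             continue
--         if possible_break - prev_good_linebreak >= linebreaks_freq:
--             if prev_good_linebreak in linebreaks:
--                 linebreaks.append(possible_break)
--             else:
--                 linebreaks.append(prev_good_linebreak)
--             prev_good_linebreak = possible_break
--
--     output = []
--     prev_linebreak = 0
--     for linebreak in linebreaks[1:]:
--         output.append(SMILES[prev_linebreak:linebreak])
--         prev_linebreak = linebreak
--
--     output.append(SMILES[prev_linebreak:])
--     return output
-- ===== SOURCE B (Python) =====
-- manysymbol_elements = ["He", "Li", "Be", "Na", "Mg", "Si", "Cl", "Br"]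
--
-- def SMILES_wlinebreaks(SMILES, linebreaks_freq):
--     # Single pass: emit each segment as soon as its end is found; no index list, no second loop.
--     output = []
--     prev = 0
--     for i in range(1, len(SMILES)):
--         if SMILES[i - 1 : i + 1].capitalize() in manysymbol_elements:
--             continue
--         if i - prev >= linebreaks_freq:
--             output.append(SMILES[prev:i])
--             prev = i
--     output.append(SMILES[prev:])
--     return output
-- ===== Notes on version B (the rewrite author's own statement) =====
-- stated objective: simpler
-- what changed: B fuses A's two passes into one: instead of collecting an index list of breakpoints (with a dead else-branch and a membership test) and then slicing in a second loop, B emits each segment directly while scanning, keeping only the last break position.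
import Mathlib
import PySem

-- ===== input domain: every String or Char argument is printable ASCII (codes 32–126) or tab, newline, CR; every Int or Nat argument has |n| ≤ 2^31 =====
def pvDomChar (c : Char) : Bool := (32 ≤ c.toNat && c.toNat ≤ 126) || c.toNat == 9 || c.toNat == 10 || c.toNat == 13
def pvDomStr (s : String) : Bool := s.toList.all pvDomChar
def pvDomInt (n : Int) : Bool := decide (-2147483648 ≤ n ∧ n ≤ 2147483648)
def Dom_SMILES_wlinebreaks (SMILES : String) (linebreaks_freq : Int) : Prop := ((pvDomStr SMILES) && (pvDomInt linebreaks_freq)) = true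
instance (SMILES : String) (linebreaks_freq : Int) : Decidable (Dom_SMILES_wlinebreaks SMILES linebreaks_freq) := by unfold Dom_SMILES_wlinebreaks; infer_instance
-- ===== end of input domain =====

-- ===== PORT A =====
-- B fuses A's two passes (collect breakpoint indices, then slice) into one direct-emission scan; objective: simpler.

def manysymbol_elements : List (List Char) :=
  [['H','e'], ['L','i'], ['B','e'], ['N','a'], ['M','g'], ['S','i'], ['C','l'], ['B','r']]

-- SMILES[possible_break-1 : possible_break+1].capitalize() in manysymbol_elements
-- (str.capitalize on the two-char slice: first char uppercased, rest lowered — exact on ASCII)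
def bad_SMILES_break (cs : List Char) (possible_break : Int) : Bool :=
  let sl := PySem.List.slice cs (some (possible_break - 1)) (some (possible_break + 1))
  let cap := match sl with
    | [] => []
    | c :: rest => PySem.Chars.upperChar c :: PySem.Chars.lower rest
  manysymbol_elements.contains cap

-- one iteration of A's first loop: state = (linebreaks, prev_good_linebreak)
def stepA (cs : List Char) (linebreaks_freq : Int) (st : List Int × Int) (possible_break : Int) :
    List Int × Int :=
  if bad_SMILES_break cs possible_break then st
  else if possible_break - st.2 ≥ linebreaks_freq then
    (if st.1.contains st.2 then st.1 ++ [possible_break] else st.1 ++ [st.2], possible_break)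
  else st

-- one iteration of A's second loop: state = (output, prev_linebreak)
def renderStep (cs : List Char) (st : List String × Int) (linebreak : Int) : List String × Int :=
  (st.1 ++ [String.ofList (PySem.List.slice cs (some st.2) (some linebreak))], linebreak)

def SMILES_wlinebreaks (SMILES : String) (linebreaks_freq : Int) : List String :=
  let cs := SMILES.toList
  let st1 := (PySem.List.pyRange 1 (PySem.Chars.len cs) 1).foldl (stepA cs linebreaks_freq) ([0], 0)
  let st2 := (st1.1.drop 1).foldl (renderStep cs) ([], 0)
  st2.1 ++ [String.ofList (PySem.List.slice cs (some st2.2) none)]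

-- ===== PORT B =====
-- one iteration of B's single loop: state = (output, prev)
def stepB (cs : List Char) (linebreaks_freq : Int) (st : List String × Int) (i : Int) :
    List String × Int :=
  if bad_SMILES_break cs i then st
  else if i - st.2 ≥ linebreaks_freq then
    (st.1 ++ [String.ofList (PySem.List.slice cs (some st.2) (some i))], i)
  else st

def SMILES_wlinebreaks_alt (SMILES : String) (linebreaks_freq : Int) : List String :=
  let cs := SMILES.toList
  let st := (PySem.List.pyRange 1 (PySem.Chars.len cs) 1).foldl (stepB cs linebreaks_freq) ([], 0)
  st.1 ++ [String.ofList (PySem.List.slice cs (some st.2) none)]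

-- ===== PRECONDITION & SPEC =====
def Spec_SMILES_wlinebreaks (SMILES : String) (linebreaks_freq : Int) (out : List String) : Prop := out = SMILES_wlinebreaks_alt SMILES linebreaks_freq
instance (SMILES : String) (linebreaks_freq : Int) (out : List String) : Decidable (Spec_SMILES_wlinebreaks SMILES linebreaks_freq out) := by unfold Spec_SMILES_wlinebreaks; infer_instance

-- ===== CLAIM (what is proved, stated in full; the proofs are below) =====
def Claim_equal_SMILES_wlinebreaks : Prop := ∀ (SMILES : String) (linebreaks_freq : Int), Dom_SMILES_wlinebreaks SMILES linebreaks_freq → Spec_SMILES_wlinebreaks SMILES linebreaks_freq (SMILES_wlinebreaks SMILES linebreaks_freq)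

-- ===== LEMMAS AND PROOFS =====

-- the break positions A's first loop selects (proof-only characterisation)
def breaks (cs : List Char) (f : Int) (p : Int) : List Int → List Int
  | [] => []
  | i :: xs =>
    if bad_SMILES_break cs i then breaks cs f p xs
    else if i - p ≥ f then i :: breaks cs f i xs
    else breaks cs f p xs

def lastOr (p : Int) : List Int → Int
  | [] => p
  | b :: bs => lastOr b bs

def segs (cs : List Char) (p : Int) : List Int → List String
  | [] => []
  | b :: bs => String.ofList (PySem.List.slice cs (some p) (some b)) :: segs cs b bs

theorem foldA_eq (cs : List Char) (f : Int) :
    ∀ (xs : List Int) (lb : List Int) (p : Int),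
      List.foldl (stepA cs f) (lb ++ [p], p) xs =
        (lb ++ [p] ++ breaks cs f p xs, lastOr p (breaks cs f p xs)) := by
  intro xs
  induction xs with
  | nil => intro lb p; simp [breaks, lastOr]
  | cons i xs ih =>
    intro lb p
    simp only [List.foldl_cons, breaks, stepA]
    by_cases hb : bad_SMILES_break cs i
    · simp [hb, ih]
    · by_cases hf : i - p ≥ f
      · have hc : (lb ++ [p]).contains p = true := by simp
        simp only [hb, hf, if_true, if_false, hc, Bool.false_eq_true]
        have := ih (lb ++ [p]) i
        simp only [List.append_assoc] at this ⊢
        simpa [lastOr] using this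
      · simp [hb, hf, ih]

theorem foldR_eq (cs : List Char) :
    ∀ (bs : List Int) (out : List String) (p : Int),
      List.foldl (renderStep cs) (out, p) bs = (out ++ segs cs p bs, lastOr p bs) := by
  intro bs
  induction bs with
  | nil => intro out p; simp [segs, lastOr]
  | cons b bs ih =>
    intro out p
    simp only [List.foldl_cons, renderStep, segs, lastOr]
    simpa using ih (out ++ [String.ofList (PySem.List.slice cs (some p) (some b))]) b

theorem foldB_eq (cs : List Char) (f : Int) :
    ∀ (xs : List Int) (out : List String) (p : Int),
      List.foldl (stepB cs f) (out, p) xs =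
        (out ++ segs cs p (breaks cs f p xs), lastOr p (breaks cs f p xs)) := by
  intro xs
  induction xs with
  | nil => intro out p; simp [breaks, segs, lastOr]
  | cons i xs ih =>
    intro out p
    simp only [List.foldl_cons, stepB, breaks]
    by_cases hb : bad_SMILES_break cs i
    · simp [hb, ih]
    · by_cases hf : i - p ≥ f
      · simp only [hb, hf, if_true, if_false, Bool.false_eq_true, segs, lastOr]
        simpa using ih (out ++ [String.ofList (PySem.List.slice cs (some p) (some i))]) i
      · simp [hb, hf, ih]

-- ===== VERDICT (by name: the statement is the Claim_ definition above) =====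
theorem SMILES_wlinebreaks_spec : Claim_equal_SMILES_wlinebreaks := by
  intro SMILES f _
  unfold Spec_SMILES_wlinebreaks SMILES_wlinebreaks SMILES_wlinebreaks_alt
  have hA := foldA_eq SMILES.toList f (PySem.List.pyRange 1 (PySem.Chars.len SMILES.toList) 1) [] 0
  have hB := foldB_eq SMILES.toList f (PySem.List.pyRange 1 (PySem.Chars.len SMILES.toList) 1) [] 0
  simp only [List.nil_append] at hA hB
  simp only [hA, hB]
  simp only [List.singleton_append, List.drop_succ_cons, List.drop_zero, foldR_eq, List.nil_append]
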